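-- pv_equiv track=rewrite | github.com/tanmaik/AI | Unit 1/Rush Hour/Blue_RushHour.py | find_cars
-- ===== SOURCE A (Python) =====
-- board_size = 6
--
-- def get_num_cars(board):
--     alphabet = "ABCDEFGHIJKX"
--     count = 0
--     for a in alphabet:
--         if a in board:
--             count += 1
--     return count
--
-- def find_cars(board):
--     cars = dict()
--     temp = board
--     horizontal = False
--     alphabet = "ABCDEFGHIJK"
--     num_cars = get_num_cars(board)
--     alphabet = alphabet[:num_cars-1] + 'X'
--     for i in range(num_cars):
--         car = alphabet[i]
--         car_size = 0
--         first_pos = 0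
--         car_xspots = dict()
--         car_yspots = dict()
--         while car in temp:
--             car_size += 1
--             pos = temp.index(car)
--             temp = temp[0:pos] + "-" + temp[pos+1: len(temp)]
--             x = pos % board_size
--             y = pos // board_size
--             if car_size == 1:
--                 first_pos = pos
--                 beg_x = x
--                 beg_y = y
--                 beginning_xy = str(x) + str(y)
--             if x in car_xspots:
--                 car_yspots[y] = x
--                 horizontal = False
--             elif y in car_yspots:
--                 car_xspots[x] = y
--                 horizontal = False
--             else:
--                 car_xspots[x] = y
--                 horizontal = True
--
--         cars[car] = (horizontal, car_size, first_pos)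
--     return cars
-- ===== SOURCE B (Python) =====
-- board_size = 6
--
-- def get_num_cars(board):
--     alphabet = "ABCDEFGHIJKX"
--     count = 0
--     for a in alphabet:
--         if a in board:
--             count += 1
--     return count
--
-- def find_cars(board):
--     cars = {}
--     horizontal = False
--     num_cars = get_num_cars(board)
--     alphabet = "ABCDEFGHIJK"[:num_cars - 1] + 'X'
--     for i in range(num_cars):
--         car = alphabet[i]
--         positions = [p for p, ch in enumerate(board) if ch == car]
--         car_size = 0
--         first_pos = 0
--         car_xspots = {}
--         car_yspots = {}
--         for pos in positions:
--             car_size += 1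
--             x = pos % board_size
--             y = pos // board_size
--             if car_size == 1:
--                 first_pos = pos
--             if x in car_xspots:
--                 car_yspots[y] = x
--                 horizontal = False
--             elif y in car_yspots:
--                 car_xspots[x] = y
--                 horizontal = False
--             else:
--                 car_xspots[x] = y
--                 horizontal = True
--         cars[car] = (horizontal, car_size, first_pos)
--     return cars
-- ===== Notes on version B (the rewrite author's own statement) =====
-- stated objective: alternative
-- what changed: B collects each car's cell indices with one enumerate comprehension over the original board and folds the same per-cell logic over that list, instead of A's while-loop that repeatedly rescans the mutated board with .index and rebuilds the whole string to mask each found cell.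
import Mathlib
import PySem

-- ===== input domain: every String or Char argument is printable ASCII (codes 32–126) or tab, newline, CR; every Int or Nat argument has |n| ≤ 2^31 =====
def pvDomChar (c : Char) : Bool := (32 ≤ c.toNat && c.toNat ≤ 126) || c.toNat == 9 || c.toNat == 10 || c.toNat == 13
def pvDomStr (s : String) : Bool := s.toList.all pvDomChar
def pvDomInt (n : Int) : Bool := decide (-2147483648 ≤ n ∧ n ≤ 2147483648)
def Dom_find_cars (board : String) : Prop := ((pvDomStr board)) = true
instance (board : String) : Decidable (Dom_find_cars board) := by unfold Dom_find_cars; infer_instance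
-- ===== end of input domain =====

-- B replaces A's while-loop (repeated .index rescans + full-string masking of the board)
-- by one enumerate pass per car collecting its cell indices; same return value.


-- ===== PORT A =====

-- get_num_cars: identical helper in Source A and Source B, shared by both ports
def get_num_cars (board : List Char) : Int :=
  ("ABCDEFGHIJKX".toList).foldl (fun count a => if PySem.Chars.isIn [a] board then count + 1 else count) 0

-- the per-cell body ('car_size += 1 … else: car_xspots[x] = y; horizontal = True'):
-- textually identical in Source A's while-loop and Source B's for-loop, shared by both ports.
-- state = (car_size, first_pos, car_xspots, car_yspots, horizontal); beg_x/beg_y/beginning_xy are dead locals, dropped.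
def cellStep (st : Int × Int × PySem.Dict Int Int × PySem.Dict Int Int × Bool) (pos : Int) :
    Int × Int × PySem.Dict Int Int × PySem.Dict Int Int × Bool :=
  match st with
  | (size, first, xs, ys, _hor) =>
    let size := size + 1
    let x := PySem.Int.mod pos 6
    let y := PySem.Int.floordiv pos 6
    let first := if size = 1 then pos else first
    if xs.contains x then (size, first, xs, ys.insert y x, false)
    else if ys.contains y then (size, first, xs.insert x y, ys, false)
    else (size, first, xs.insert x y, ys, true)

-- A's 'while car in temp' loop; the fuel (called with the length of temp, a bound on the
-- occurrence count) only makes the recursion structural, it never cuts the loop short.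
def carWhileA (car : Char) :
    Nat → List Char → (Int × Int × PySem.Dict Int Int × PySem.Dict Int Int × Bool) →
    List Char × (Int × Int × PySem.Dict Int Int × PySem.Dict Int Int × Bool)
  | 0, temp, st => (temp, st)
  | Nat.succ fuel, temp, st =>
    if PySem.Chars.isIn [car] temp then
      let pos : Int := PySem.Chars.find temp [car]
      let temp' := PySem.List.slice temp (some 0) (some pos) ++ ['-'] ++
                   PySem.List.slice temp (some (pos + 1)) (some (PySem.List.len temp))
      carWhileA car fuel temp' (cellStep st pos)
    else (temp, st)

-- one iteration of A's 'for i in range(num_cars)' loop (threads cars, temp, horizontal)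
def stepA (alphabet : List Char)
    (acc : PySem.Dict String (Bool × Int × Int) × List Char × Bool) (i : Int) :
    PySem.Dict String (Bool × Int × Int) × List Char × Bool :=
  match acc with
  | (cars, temp, hor) =>
    let car := PySem.List.pyGetD alphabet i ' '
    let r := carWhileA car temp.length temp (0, 0, PySem.Dict.empty, PySem.Dict.empty, hor)
    (cars.insert (String.ofList [car]) (r.2.2.2.2.2, r.2.1, r.2.2.1), r.1, r.2.2.2.2.2)

def find_cars (board : String) : List (String × Bool × Int × Int) :=
  let temp0 := board.toList
  let num_cars := get_num_cars board.toList
  let alphabet := PySem.List.slice ("ABCDEFGHIJK".toList) none (some (num_cars - 1)) ++ ['X']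
  let r := (PySem.List.pyRange 0 num_cars 1).foldl (stepA alphabet)
    ((PySem.Dict.empty : PySem.Dict String (Bool × Int × Int)), temp0, false)
  r.1.items

-- ===== PORT B =====

-- one iteration of B's car loop: positions from one enumerate comprehension over the
-- original board, then a fold of the same per-cell body (threads cars, horizontal only)
def stepB (bl : List Char) (alphabet : List Char)
    (acc : PySem.Dict String (Bool × Int × Int) × Bool) (i : Int) :
    PySem.Dict String (Bool × Int × Int) × Bool :=
  match acc with
  | (cars, hor) =>
    let car := PySem.List.pyGetD alphabet i ' '
    let positions := ((PySem.List.enumerate bl 0).filter (fun p => p.2 == car)).map (fun p => p.1)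
    let st := positions.foldl cellStep (0, 0, PySem.Dict.empty, PySem.Dict.empty, hor)
    (cars.insert (String.ofList [car]) (st.2.2.2.2, st.1, st.2.1), st.2.2.2.2)

def find_cars_alt (board : String) : List (String × Bool × Int × Int) :=
  let bl := board.toList
  let num_cars := get_num_cars bl
  let alphabet := PySem.List.slice ("ABCDEFGHIJK".toList) none (some (num_cars - 1)) ++ ['X']
  let r := (PySem.List.pyRange 0 num_cars 1).foldl (stepB bl alphabet)
    ((PySem.Dict.empty : PySem.Dict String (Bool × Int × Int)), false)
  r.1.items

-- ===== PRECONDITION & SPEC =====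
def Spec_find_cars (board : String) (out : List (String × Bool × Int × Int)) : Prop := out = find_cars_alt board
instance (board : String) (out : List (String × Bool × Int × Int)) : Decidable (Spec_find_cars board out) := by unfold Spec_find_cars; infer_instance

-- ===== CLAIM (what is proved, stated in full; the proofs are below) =====
def Claim_equal_find_cars : Prop := ∀ (board : String), Dom_find_cars board → Spec_find_cars board (find_cars board)

-- ===== LEMMAS AND PROOFS =====

-- occF c l s = the indices (offset by s) of the cells holding c, i.e. B's comprehension
def occF (c : Char) (l : List Char) (s : Int) : List Int :=
  ((PySem.List.enumerate l s).filter (fun p => p.2 == c)).map (fun p => p.1)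

theorem occF_cons (c a : Char) (l : List Char) (s : Int) :
    occF c (a :: l) s = (if a == c then [s] else []) ++ occF c l (s + 1) := by
  simp only [occF, PySem.List.enumerate_cons, List.filter_cons]
  by_cases h : a = c <;> simp [h]

theorem occF_append (c : Char) (l₁ l₂ : List Char) (s : Int) :
    occF c (l₁ ++ l₂) s = occF c l₁ s ++ occF c l₂ (s + l₁.length) := by
  simp [occF, PySem.List.enumerate_append]

theorem occF_eq_nil_iff (c : Char) (l : List Char) (s : Int) : occF c l s = [] ↔ c ∉ l := by
  induction l generalizing s with
  | nil => simp [occF]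
  | cons a l ih =>
    rw [occF_cons]
    by_cases h : a = c
    · subst h; simp
    · simp [beq_eq_false_iff_ne.mpr h, ih, Ne.symm h]

theorem occF_length_le (c : Char) (l : List Char) (s : Int) :
    (occF c l s).length ≤ l.length := by
  induction l generalizing s with
  | nil => simp [occF]
  | cons a l ih =>
    rw [occF_cons]
    have := ih (s + 1)
    by_cases h : (a == c) = true <;> simp [h] <;> omega

theorem occF_mask (c c' : Char) {l : List Char} (h1 : c ≠ c') (h2 : c ≠ '-') (s : Int) :
    occF c (l.map (fun a => if a == c' then '-' else a)) s = occF c l s := by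
  induction l generalizing s with
  | nil => rfl
  | cons a l ih =>
    simp only [List.map_cons]
    rw [occF_cons, occF_cons, ih]
    congr 1
    by_cases h : a = c'
    · subst h
      simp [beq_eq_false_iff_ne.mpr (Ne.symm h2), beq_eq_false_iff_ne.mpr (Ne.symm h1)]
    · simp [h]

theorem mask_of_not_mem (c : Char) {l : List Char} (h : c ∉ l) :
    l.map (fun a => if a == c then '-' else a) = l := by
  induction l with
  | nil => rfl
  | cons a l ih =>
    simp only [List.mem_cons, not_or] at h
    rw [List.map_cons, ih h.2, if_neg (by simpa using fun e : a = c => h.1 e.symm)]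

theorem singleton_infix_iff (c : Char) (l : List Char) : [c] <:+: l ↔ c ∈ l := by
  constructor
  · rintro ⟨s, t, rfl⟩; simp
  · intro h
    obtain ⟨s, t, rfl⟩ := List.append_of_mem h
    exact ⟨s, t, by simp⟩

-- first-occurrence decomposition from Chars.find
theorem find_decomp (c : Char) {l : List Char} (h : c ∈ l) :
    ∃ pre suf, l = pre ++ c :: suf ∧ c ∉ pre ∧
      PySem.Chars.find l [c] = (pre.length : Int) := by
  have hnn : 0 ≤ PySem.Chars.find l [c] :=
    (PySem.Chars.find_nonneg_iff l [c]).mpr ((singleton_infix_iff c l).mpr h)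
  obtain ⟨hpre, hmin⟩ := PySem.Chars.find_spec hnn
  set k := (PySem.Chars.find l [c]).toNat with hk
  obtain ⟨t, ht⟩ := hpre
  have hklt : k < l.length := by
    by_contra hge
    rw [not_lt] at hge
    rw [List.drop_eq_nil_of_le hge] at ht
    simp at ht
  refine ⟨l.take k, t, ?_, ?_, ?_⟩
  · conv_lhs => rw [← List.take_append_drop k l]
    rw [← ht]; simp
  · intro hc
    obtain ⟨i, hi, hival⟩ := List.mem_iff_getElem.mp hc
    have hik : i < k := by
      have := List.length_take_le k l
      omega
    apply hmin i hik
    have hil : i < l.length := lt_of_lt_of_le hik (le_of_lt hklt)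
    rw [List.drop_eq_getElem_cons hil]
    refine ⟨l.drop (i + 1), ?_⟩
    have hgi : l[i] = c := by
      rw [← hival]; simp [List.getElem_take]
    simp [hgi]
  · rw [List.length_take, min_eq_left (le_of_lt hklt)]
    omega

-- A's inner while-loop, characterised as B's fold over the occurrence list
theorem carWhileA_eq (car : Char) (hcar : car ≠ '-') :
    ∀ (fuel : Nat) (temp : List Char)
      (st : Int × Int × PySem.Dict Int Int × PySem.Dict Int Int × Bool),
      (occF car temp 0).length ≤ fuel →
      carWhileA car fuel temp st =
        (temp.map (fun a => if a == car then '-' else a), (occF car temp 0).foldl cellStep st) := by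
  intro fuel
  induction fuel with
  | zero =>
    intro temp st hlen
    have hnil : occF car temp 0 = [] := List.eq_nil_of_length_eq_zero (by omega)
    have hnm : car ∉ temp := (occF_eq_nil_iff _ _ _).mp hnil
    rw [hnil, mask_of_not_mem car hnm]
    rfl
  | succ fuel ih =>
    intro temp st hlen
    by_cases hin : PySem.Chars.isIn [car] temp
    · have hmem : car ∈ temp :=
        (singleton_infix_iff car temp).mp ((PySem.Chars.isIn_iff_infix _ _).mp hin)
      obtain ⟨pre, suf, hdec, hnp, hfind⟩ := find_decomp car hmem
      have hlentemp : temp.length = pre.length + suf.length + 1 := by rw [hdec]; simp; omega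
      have hslice1 : PySem.List.slice temp (some 0) (some (PySem.Chars.find temp [car])) = pre := by
        rw [hfind, PySem.List.slice_zero_start, PySem.List.slice_to_natCast, hdec, List.take_left]
      have hslice2 : PySem.List.slice temp (some (PySem.Chars.find temp [car] + 1))
          (some (PySem.List.len temp)) = suf := by
        rw [hfind]
        have h1 : ((pre.length : Int) + 1) = (((pre.length + 1 : Nat)) : Int) := by push_cast; ring
        have h2 : PySem.List.len temp = ((temp.length : Nat) : Int) := by
          simp [PySem.List.len_eq]
        rw [h1, h2, PySem.List.slice_natCast]
        have hdrop : List.drop (pre.length + 1) temp = suf := by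
          rw [hdec, show pre ++ car :: suf = (pre ++ [car]) ++ suf by simp]
          have := List.drop_left (l₁ := pre ++ [car]) (l₂ := suf)
          simpa using this
        rw [hdrop, hlentemp]
        have : pre.length + suf.length + 1 - (pre.length + 1) = suf.length := by omega
        rw [this, List.take_length]
      have hocc : occF car temp 0 = (pre.length : Int) :: occF car suf ((pre.length : Int) + 1) := by
        rw [hdec, occF_append, (occF_eq_nil_iff car pre 0).mpr hnp, occF_cons]
        simp
      have hocc' : occF car (pre ++ '-' :: suf) 0 = occF car suf ((pre.length : Int) + 1) := by
        rw [occF_append, (occF_eq_nil_iff car pre 0).mpr hnp, occF_cons]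
        simp [beq_eq_false_iff_ne.mpr (Ne.symm hcar)]
      have hmask : ((pre ++ '-' :: suf).map (fun a => if a == car then '-' else a)) =
          temp.map (fun a => if a == car then '-' else a) := by
        rw [hdec]
        simp
      have hlen' : (occF car (pre ++ '-' :: suf) 0).length ≤ fuel := by
        rw [hocc']
        rw [hocc] at hlen
        simp at hlen
        omega
      show (if PySem.Chars.isIn [car] temp then _ else _) = _
      rw [if_pos hin]
      simp only [hslice1, hslice2, show pre ++ ['-'] ++ suf = pre ++ '-' :: suf by simp]
      rw [ih _ _ hlen', hmask, hocc', hocc, List.foldl_cons, hfind]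
    · have hnm : car ∉ temp := by
        intro hmem
        exact hin ((PySem.Chars.isIn_iff_infix _ _).mpr ((singleton_infix_iff car temp).mpr hmem))
      have hnil : occF car temp 0 = [] := (occF_eq_nil_iff _ _ _).mpr hnm
      show (if PySem.Chars.isIn [car] temp then _ else _) = _
      rw [if_neg hin, hnil, mask_of_not_mem car hnm]
      rfl

-- the two outer loops produce the same cars dict
theorem outer_eq (bl alphabet : List Char) :
    ∀ (idxs : List Int) (cars : PySem.Dict String (Bool × Int × Int)) (temp : List Char) (hor : Bool),
      (∀ i ∈ idxs, PySem.List.pyGetD alphabet i ' ' ≠ '-' ∧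
        occF (PySem.List.pyGetD alphabet i ' ') temp 0 = occF (PySem.List.pyGetD alphabet i ' ') bl 0) →
      idxs.Pairwise (fun i j => PySem.List.pyGetD alphabet i ' ' ≠ PySem.List.pyGetD alphabet j ' ') →
      (idxs.foldl (stepA alphabet) (cars, temp, hor)).1 =
      (idxs.foldl (stepB bl alphabet) (cars, hor)).1 := by
  intro idxs
  induction idxs with
  | nil => intro cars temp hor _ _; rfl
  | cons i rest ih =>
    intro cars temp hor hmem hpw
    obtain ⟨hdash, hocc⟩ := hmem i List.mem_cons_self
    rw [List.foldl_cons, List.foldl_cons]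
    set car := PySem.List.pyGetD alphabet i ' ' with hcardef
    set stT := (occF car temp 0).foldl cellStep (0, 0, PySem.Dict.empty, PySem.Dict.empty, hor) with hstT
    set stB := (occF car bl 0).foldl cellStep (0, 0, PySem.Dict.empty, PySem.Dict.empty, hor) with hstB
    have hwhile := carWhileA_eq car hdash temp.length temp
      (0, 0, PySem.Dict.empty, PySem.Dict.empty, hor) (occF_length_le _ _ _)
    have hA : stepA alphabet (cars, temp, hor) i =
        (cars.insert (String.ofList [car]) (stT.2.2.2.2, stT.1, stT.2.1),
         temp.map (fun a => if a == car then '-' else a), stT.2.2.2.2) := by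
      show (cars.insert (String.ofList [car])
             ((carWhileA car temp.length temp (0, 0, PySem.Dict.empty, PySem.Dict.empty, hor)).2.2.2.2.2,
              (carWhileA car temp.length temp (0, 0, PySem.Dict.empty, PySem.Dict.empty, hor)).2.1,
              (carWhileA car temp.length temp (0, 0, PySem.Dict.empty, PySem.Dict.empty, hor)).2.2.1),
            (carWhileA car temp.length temp (0, 0, PySem.Dict.empty, PySem.Dict.empty, hor)).1,
            (carWhileA car temp.length temp (0, 0, PySem.Dict.empty, PySem.Dict.empty, hor)).2.2.2.2.2) = _
      rw [hwhile]
    have hB : stepB bl alphabet (cars, hor) i =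
        (cars.insert (String.ofList [car]) (stB.2.2.2.2, stB.1, stB.2.1), stB.2.2.2.2) := rfl
    have hstEq : stT = stB := by rw [hstT, hstB, hocc]
    rw [hA, hB, hstEq]
    apply ih
    · intro j hj
      obtain ⟨hd, ho⟩ := hmem j (List.mem_cons_of_mem _ hj)
      refine ⟨hd, ?_⟩
      rw [occF_mask _ _ ((List.pairwise_cons.mp hpw).1 j hj).symm hd 0, ho]
    · exact (List.pairwise_cons.mp hpw).2

theorem pyGetD_mem_or_default {α : Type} (xs : List α) (i : Int) (d : α) :
    PySem.List.pyGetD xs i d ∈ xs ∨ PySem.List.pyGetD xs i d = d := by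
  rcases h : PySem.List.pyGet? xs i with _ | x
  · right; simp [PySem.List.pyGetD, h]
  · left
    have := PySem.List.mem_of_pyGet?_eq_some xs h
    simpa [PySem.List.pyGetD, h]

theorem num_cars_bound (bl : List Char) :
    ∃ m : Nat, get_num_cars bl = (m : Int) ∧ m ≤ 12 := by
  unfold get_num_cars
  rw [PySem.List.foldl_count_if]
  refine ⟨_, by ring, ?_⟩
  calc List.countP (fun a => PySem.Chars.isIn [a] bl) "ABCDEFGHIJKX".toList
      ≤ ("ABCDEFGHIJKX".toList).length := List.countP_le_length
    _ = 12 := by decide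

-- ===== VERDICT (by name: the statement is the Claim_ definition above) =====
theorem klist_ne_dash : ∀ c ∈ "ABCDEFGHIJK".toList, c ≠ '-' := by
  intro c hc he
  rw [he] at hc
  exact (by decide : ('-' : Char) ∉ "ABCDEFGHIJK".toList) hc

theorem klist_nodup : ("ABCDEFGHIJK".toList).Nodup := by decide

theorem X_not_mem_klist : ('X' : Char) ∉ "ABCDEFGHIJK".toList := by decide

theorem alpha_ne_dash (b? : Option Int) (i : Int) :
    PySem.List.pyGetD (PySem.List.slice ("ABCDEFGHIJK".toList) none b? ++ ['X']) i ' ' ≠ '-' := by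
  rcases pyGetD_mem_or_default (PySem.List.slice ("ABCDEFGHIJK".toList) none b? ++ ['X']) i ' '
    with h | h
  · rcases List.mem_append.mp h with hmem | hmem
    · exact klist_ne_dash _ (PySem.List.mem_of_mem_slice _ none b? hmem)
    · simp only [List.mem_singleton] at hmem
      rw [hmem]; decide
  · rw [h]; decide

theorem find_cars_spec : Claim_equal_find_cars := by
  intro board _
  show find_cars board = find_cars_alt board
  obtain ⟨m, hm, hm12⟩ := num_cars_bound board.toList
  set n := get_num_cars board.toList with hn
  set alpha := PySem.List.slice ("ABCDEFGHIJK".toList) none (some (n - 1)) ++ ['X'] with halpha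
  have key : ((PySem.List.pyRange 0 n 1).foldl (stepA alpha)
        (PySem.Dict.empty, board.toList, false)).1 =
      ((PySem.List.pyRange 0 n 1).foldl (stepB board.toList alpha)
        (PySem.Dict.empty, false)).1 := by
    rcases Nat.eq_zero_or_pos m with h0 | hpos
    · have hnil : PySem.List.pyRange 0 n 1 = [] :=
        PySem.List.pyRange_one_eq_nil (by omega)
      rw [hnil]
      rfl
    · have hcast : n - 1 = (((m - 1 : Nat)) : Int) := by omega
      have halpha' : alpha = List.take (m - 1) "ABCDEFGHIJK".toList ++ ['X'] := by
        rw [halpha, hcast, PySem.List.slice_to_natCast]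
      have hlenalpha : alpha.length = m := by
        rw [halpha']
        simp [List.length_take]
        omega
      have hnodup : alpha.Nodup := by
        rw [halpha', List.nodup_append]
        refine ⟨List.Nodup.sublist (List.take_sublist _ _) klist_nodup, by simp, ?_⟩
        intro c hc x hx
        have hsub : c ∈ "ABCDEFGHIJK".toList := List.mem_of_mem_take hc
        rw [List.mem_singleton] at hx
        subst hx
        exact fun he => X_not_mem_klist (he ▸ hsub)
      apply outer_eq
      · intro i _
        exact ⟨halpha ▸ alpha_ne_dash (some (n - 1)) i, rfl⟩
      · apply List.Pairwise.imp_of_mem ?_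
          (PySem.List.pairwise_lt_pyRange_one (a := 0) (b := n))
        intro a b ha hb hlt
        obtain ⟨ha0, han⟩ := (PySem.List.mem_pyRange_one).mp ha
        obtain ⟨hb0, hbn⟩ := (PySem.List.mem_pyRange_one).mp hb
        have hlen' : (alpha.length : Int) = (m : Int) := by rw [hlenalpha]
        rw [PySem.List.pyGetD_eq_getElem alpha ' ' ha0 (by omega),
            PySem.List.pyGetD_eq_getElem alpha ' ' hb0 (by omega)]
        intro heq
        have := (List.Nodup.getElem_inj_iff hnodup).mp heq
        omega
  exact congrArg PySem.Dict.items key
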